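-- pv_equiv track=rewrite | github.com/immanuelk1m/video-subtitle-remover | backend/main.py | find_continuous_ranges_with_same_mask
-- ===== SOURCE A (Python) =====
-- def find_continuous_ranges_with_same_mask(subtitle_frame_no_box_dict):
--     numbers = sorted(list(subtitle_frame_no_box_dict.keys()))
--     ranges = []
--     start = numbers[0]  # 초기 구간 시작 값
--     for i in range(1, len(numbers)):
--         # 현재 프레임 번호와 이전 프레임 번호 간격이 1을 초과하면,
--         # 이전 구간이 종료되고 현재 구간의 시작과 끝을 기록합니다.
--         if numbers[i] - numbers[i - 1] != 1:
--             end = numbers[i - 1]  # 이 숫자는 현재 연속 구간의 끝점입니다.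
--             ranges.append((start, end))
--             start = numbers[i]  # 다음 연속 구간 시작
--         # 현재 프레임 번호와 이전 프레임 번호 간격이 1이고, 현재 프레임 번호에 해당하는 좌표점과 이전 프레임 번호에 해당하는 좌표점이 일치하지 않으면
--         # 현재 구간의 시작과 끝을 기록합니다.
--         if numbers[i] - numbers[i - 1] == 1:
--             if subtitle_frame_no_box_dict[numbers[i]] != subtitle_frame_no_box_dict[numbers[i - 1]]:
--                 end = numbers[i - 1]  # 이 숫자는 현재 연속 구간의 끝점입니다.
--                 ranges.append((start, end))
--                 start = numbers[i]  # 다음 연속 구간 시작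
--     # 마지막 구간 추가
--     ranges.append((start, numbers[-1]))
--     return ranges
-- ===== SOURCE B (Python) =====
-- def find_continuous_ranges_with_same_mask(subtitle_frame_no_box_dict):
--     numbers = sorted(subtitle_frame_no_box_dict)
--     breaks = [i for i in range(1, len(numbers))
--               if numbers[i] - numbers[i - 1] != 1
--               or subtitle_frame_no_box_dict[numbers[i]] != subtitle_frame_no_box_dict[numbers[i - 1]]]
--     bounds = [0] + breaks + [len(numbers)]
--     return [(numbers[a], numbers[b - 1]) for a, b in zip(bounds, bounds[1:])]
-- ===== Notes on version B (the rewrite author's own statement) =====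
-- stated objective: simpler
-- what changed: A threads a start/end accumulator through an index loop with two if-blocks; B first computes the list of break indices (where adjacent sorted keys are non-consecutive or their mask values differ), pads it with the outer bounds 0 and len, and emits one (first, last) pair per consecutive pair of bounds.
import Mathlib
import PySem

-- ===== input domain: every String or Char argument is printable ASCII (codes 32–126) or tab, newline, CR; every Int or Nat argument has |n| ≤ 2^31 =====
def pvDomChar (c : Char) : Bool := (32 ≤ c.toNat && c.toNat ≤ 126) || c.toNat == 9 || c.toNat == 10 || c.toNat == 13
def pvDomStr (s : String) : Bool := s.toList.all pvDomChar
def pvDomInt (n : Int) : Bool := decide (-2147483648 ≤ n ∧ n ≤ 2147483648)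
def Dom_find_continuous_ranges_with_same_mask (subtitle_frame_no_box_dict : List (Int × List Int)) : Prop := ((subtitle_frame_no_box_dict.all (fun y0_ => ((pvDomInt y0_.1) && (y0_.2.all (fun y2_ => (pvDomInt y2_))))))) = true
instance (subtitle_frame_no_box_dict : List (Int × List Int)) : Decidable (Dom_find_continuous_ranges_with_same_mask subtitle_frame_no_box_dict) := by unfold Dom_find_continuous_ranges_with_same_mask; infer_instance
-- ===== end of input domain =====

-- B replaces A's stateful start/end accumulator loop by computing the break indices first and then
-- emitting one (first, last) pair per consecutive pair of bounds (simpler decomposition, same cost).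

-- ===== PORT A =====
def find_continuous_ranges_with_same_mask (subtitle_frame_no_box_dict : List (Int × List Int)) : List (Int × Int) :=
  let d := PySem.Dict.ofList subtitle_frame_no_box_dict
  let numbers := PySem.List.sorted d.keys (fun x => x) false
  -- start = numbers[0]  (IndexError on the empty dict; excluded by Pre_)
  let start0 := PySem.List.pyGetD numbers 0 0
  let res := (PySem.List.pyRange 1 (PySem.List.len numbers)).foldl
    (fun (st : List (Int × Int) × Int) i =>
      let ni := PySem.List.pyGetD numbers i 0
      let np := PySem.List.pyGetD numbers (i - 1) 0
      let st1 := if ni - np ≠ 1 then (st.1 ++ [(st.2, np)], ni) else st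
      if ni - np = 1 then
        if d.getD ni [] ≠ d.getD np [] then (st1.1 ++ [(st1.2, np)], ni) else st1
      else st1)
    ([], start0)
  res.1 ++ [(res.2, PySem.List.pyGetD numbers (-1) 0)]

-- ===== PORT B =====
def find_continuous_ranges_with_same_mask_alt (subtitle_frame_no_box_dict : List (Int × List Int)) : List (Int × Int) :=
  let d := PySem.Dict.ofList subtitle_frame_no_box_dict
  let numbers := PySem.List.sorted d.keys (fun x => x) false
  let breaks := (PySem.List.pyRange 1 (PySem.List.len numbers)).filter
    (fun i => decide (PySem.List.pyGetD numbers i 0 - PySem.List.pyGetD numbers (i - 1) 0 ≠ 1 ∨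
      d.getD (PySem.List.pyGetD numbers i 0) [] ≠ d.getD (PySem.List.pyGetD numbers (i - 1) 0) []))
  let bounds := [0] ++ breaks ++ [PySem.List.len numbers]
  (bounds.zip bounds.tail).map
    (fun ab => (PySem.List.pyGetD numbers ab.1 0, PySem.List.pyGetD numbers (ab.2 - 1) 0))

-- ===== PRECONDITION & SPEC =====
-- Pre_ excludes exactly the empty dict, on which A raises IndexError (and so does B).
def Pre_find_continuous_ranges_with_same_mask (subtitle_frame_no_box_dict : List (Int × List Int)) : Prop :=
  subtitle_frame_no_box_dict ≠ []
instance (subtitle_frame_no_box_dict : List (Int × List Int)) : Decidable (Pre_find_continuous_ranges_with_same_mask subtitle_frame_no_box_dict) := by unfold Pre_find_continuous_ranges_with_same_mask; infer_instance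
def pvWitness_find_continuous_ranges_with_same_mask : (List (Int × List Int)) := [(1, [7]), (2, [7]), (5, [8])]
def Spec_find_continuous_ranges_with_same_mask (subtitle_frame_no_box_dict : List (Int × List Int)) (out : List (Int × Int)) : Prop := out = find_continuous_ranges_with_same_mask_alt subtitle_frame_no_box_dict
instance (subtitle_frame_no_box_dict : List (Int × List Int)) (out : List (Int × Int)) : Decidable (Spec_find_continuous_ranges_with_same_mask subtitle_frame_no_box_dict out) := by unfold Spec_find_continuous_ranges_with_same_mask; infer_instance

-- ===== CLAIM (what is proved, stated in full; the proofs are below) =====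
def Claim_equal_find_continuous_ranges_with_same_mask : Prop := ∀ (subtitle_frame_no_box_dict : List (Int × List Int)), Dom_find_continuous_ranges_with_same_mask subtitle_frame_no_box_dict → Pre_find_continuous_ranges_with_same_mask subtitle_frame_no_box_dict → Spec_find_continuous_ranges_with_same_mask subtitle_frame_no_box_dict (find_continuous_ranges_with_same_mask subtitle_frame_no_box_dict)

-- ===== LEMMAS AND PROOFS =====

-- numbers[k] (in range throughout; 0 default as in the ports' total indexing)
def pvNum (numbers : List Int) (k : Nat) : Int := numbers.getD k 0

-- the break test both programs perform between positions k-1 and k of the sorted key list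
def pvBrk (d : PySem.Dict Int (List Int)) (numbers : List Int) (k : Nat) : Bool :=
  decide (pvNum numbers k - pvNum numbers (k - 1) ≠ 1 ∨
    d.getD (pvNum numbers k) [] ≠ d.getD (pvNum numbers (k - 1)) [])

-- A's loop body, named (the port's lambda is definitionally this)
def pvStepA (d : PySem.Dict Int (List Int)) (numbers : List Int) :
    List (Int × Int) × Int → Int → List (Int × Int) × Int :=
  fun st i =>
    let ni := PySem.List.pyGetD numbers i 0
    let np := PySem.List.pyGetD numbers (i - 1) 0
    let st1 := if ni - np ≠ 1 then (st.1 ++ [(st.2, np)], ni) else st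
    if ni - np = 1 then
      if d.getD ni [] ≠ d.getD np [] then (st1.1 ++ [(st1.2, np)], ni) else st1
    else st1

-- B's break predicate, named (the port's lambda is definitionally this)
def pvBrkI (d : PySem.Dict Int (List Int)) (numbers : List Int) : Int → Bool :=
  fun i => decide (PySem.List.pyGetD numbers i 0 - PySem.List.pyGetD numbers (i - 1) 0 ≠ 1 ∨
    d.getD (PySem.List.pyGetD numbers i 0) [] ≠ d.getD (PySem.List.pyGetD numbers (i - 1) 0) [])

-- common recursive description: the ranges covering numbers[k-1..], the current group having begun at `start`
def pvChop (numbers : List Int) (brk : Nat → Bool) : Nat → Nat → Int → List (Int × Int)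
  | 0, _, start => [(start, pvNum numbers (numbers.length - 1))]
  | fuel + 1, k, start =>
    if brk k then (start, pvNum numbers (k - 1)) :: pvChop numbers brk fuel (k + 1) (pvNum numbers k)
    else pvChop numbers brk fuel (k + 1) start

lemma pvGet_cast (numbers : List Int) (k : Nat) :
    PySem.List.pyGetD numbers (k : Int) 0 = pvNum numbers k :=
  PySem.List.pyGetD_natCast numbers k 0

lemma pvGet_cast' (numbers : List Int) (k : Nat) (hk : 1 ≤ k) :
    PySem.List.pyGetD numbers ((k : Int) - 1) 0 = pvNum numbers (k - 1) := by
  rw [show (k : Int) - 1 = ((k - 1 : Nat) : Int) by omega]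
  exact PySem.List.pyGetD_natCast numbers (k - 1) 0

lemma pvStepA_cast (d : PySem.Dict Int (List Int)) (numbers : List Int) (k : Nat) (hk : 1 ≤ k)
    (st : List (Int × Int) × Int) :
    pvStepA d numbers st (k : Int) =
      if pvBrk d numbers k then (st.1 ++ [(st.2, pvNum numbers (k - 1))], pvNum numbers k) else st := by
  unfold pvStepA pvBrk
  rw [pvGet_cast numbers k, pvGet_cast' numbers k hk]
  by_cases h1 : pvNum numbers k - pvNum numbers (k - 1) = 1
  · by_cases h2 : d.getD (pvNum numbers k) [] = d.getD (pvNum numbers (k - 1)) []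
    · simp [h1, h2]
    · simp [h1, h2]
  · simp [h1]

lemma pvBrkI_cast (d : PySem.Dict Int (List Int)) (numbers : List Int) (k : Nat) (hk : 1 ≤ k) :
    pvBrkI d numbers (k : Int) = pvBrk d numbers k := by
  unfold pvBrkI pvBrk
  rw [pvGet_cast numbers k, pvGet_cast' numbers k hk]

lemma pvA_loop (d : PySem.Dict Int (List Int)) (numbers : List Int) :
    ∀ (fuel k : Nat) (acc : List (Int × Int)) (start : Int), fuel + k = numbers.length → 1 ≤ k →
    ((PySem.List.pyRange (k : Int) (numbers.length : Int)).foldl (pvStepA d numbers) (acc, start)).1 ++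
      [(((PySem.List.pyRange (k : Int) (numbers.length : Int)).foldl (pvStepA d numbers) (acc, start)).2,
        pvNum numbers (numbers.length - 1))]
    = acc ++ pvChop numbers (pvBrk d numbers) fuel k start := by
  intro fuel
  induction fuel with
  | zero =>
    intro k acc start hk _
    have hba : (numbers.length : Int) ≤ (k : Int) := by omega
    have hr : PySem.List.pyRange (k : Int) (numbers.length : Int) = [] := by simp [pysem, hba]
    rw [hr]
    simp [pvChop]
  | succ fuel ih =>
    intro k acc start hk hk1
    have hlt : (k : Int) < (numbers.length : Int) := by omega
    rw [PySem.List.pyRange_one_cons hlt, List.foldl_cons, pvStepA_cast d numbers k hk1,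
      show (k : Int) + 1 = ((k + 1 : Nat) : Int) by push_cast; ring]
    by_cases hb : pvBrk d numbers k = true
    · rw [if_pos hb, ih (k + 1) (acc ++ [(start, pvNum numbers (k - 1))]) (pvNum numbers k)
        (by omega) (by omega)]
      simp [pvChop, hb]
    · rw [if_neg hb, ih (k + 1) acc start (by omega) (by omega)]
      simp [pvChop, hb]

lemma pvB_chop (d : PySem.Dict Int (List Int)) (numbers : List Int) :
    ∀ (fuel k j : Nat), fuel + k = numbers.length → j < k →
    (((j : Int) ::
        ((PySem.List.pyRange (k : Int) (numbers.length : Int)).filter (pvBrkI d numbers) ++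
          [(numbers.length : Int)])).zip
      ((PySem.List.pyRange (k : Int) (numbers.length : Int)).filter (pvBrkI d numbers) ++
        [(numbers.length : Int)])).map
      (fun ab => (PySem.List.pyGetD numbers ab.1 0, PySem.List.pyGetD numbers (ab.2 - 1) 0))
    = pvChop numbers (pvBrk d numbers) fuel k (pvNum numbers j) := by
  intro fuel
  induction fuel with
  | zero =>
    intro k j hk hj
    have hba : (numbers.length : Int) ≤ (k : Int) := by omega
    have hr : PySem.List.pyRange (k : Int) (numbers.length : Int) = [] := by simp [pysem, hba]
    rw [hr]
    simp only [List.filter_nil, List.nil_append, List.zip_cons_cons, List.zip_nil_right,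
      List.map_cons, List.map_nil]
    rw [pvGet_cast numbers j, pvGet_cast' numbers numbers.length (by omega)]
    simp [pvChop]
  | succ fuel ih =>
    intro k j hk hj
    have hlt : (k : Int) < (numbers.length : Int) := by omega
    rw [PySem.List.pyRange_one_cons hlt, List.filter_cons, pvBrkI_cast d numbers k (by omega),
      show (k : Int) + 1 = ((k + 1 : Nat) : Int) by push_cast; ring]
    by_cases hb : pvBrk d numbers k = true
    · rw [if_pos hb]
      simp only [List.cons_append, List.zip_cons_cons, List.map_cons]
      rw [ih (k + 1) k (by omega) (by omega), pvGet_cast numbers j, pvGet_cast' numbers k (by omega)]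
      simp [pvChop, hb]
    · rw [if_neg hb, ih (k + 1) j (by omega) (by omega)]
      simp [pvChop, hb]

lemma pv_numbers_ne_nil (l : List (Int × List Int)) (h : l ≠ []) :
    PySem.List.sorted (PySem.Dict.ofList l).keys (fun x => x) false ≠ [] := by
  rw [Ne, PySem.List.sorted_eq_nil_iff]
  intro hk
  cases l with
  | nil => exact h rfl
  | cons p t =>
    have hmem : p.1 ∈ (PySem.Dict.ofList (p :: t)).keys := by
      have e : PySem.Dict.ofList (p :: t) = (p :: t).foldl (fun d q => d.insert q.1 q.2) PySem.Dict.empty := rfl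
      rw [e, PySem.Dict.keys_foldl_insert_key]
      simp
    rw [hk] at hmem
    exact absurd hmem (List.not_mem_nil)

-- ===== VERDICT (by name: the statement is the Claim_ definition above) =====
theorem find_continuous_ranges_with_same_mask_spec : Claim_equal_find_continuous_ranges_with_same_mask := by
  intro l _ hpre
  unfold Spec_find_continuous_ranges_with_same_mask
  unfold find_continuous_ranges_with_same_mask find_continuous_ranges_with_same_mask_alt
  simp only [PySem.List.len_eq]
  set D := PySem.Dict.ofList l with hD
  set numbers := PySem.List.sorted D.keys (fun x => x) false with hnum
  have hne : numbers ≠ [] := pv_numbers_ne_nil l hpre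
  have hn : 1 ≤ numbers.length := List.length_pos_of_ne_nil hne
  have hfA : (fun (st : List (Int × Int) × Int) i =>
      let ni := PySem.List.pyGetD numbers i 0
      let np := PySem.List.pyGetD numbers (i - 1) 0
      let st1 := if ni - np ≠ 1 then (st.1 ++ [(st.2, np)], ni) else st
      if ni - np = 1 then
        if D.getD ni [] ≠ D.getD np [] then (st1.1 ++ [(st1.2, np)], ni) else st1
      else st1) = pvStepA D numbers := rfl
  have hfB : (fun i => decide (PySem.List.pyGetD numbers i 0 - PySem.List.pyGetD numbers (i - 1) 0 ≠ 1 ∨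
      D.getD (PySem.List.pyGetD numbers i 0) [] ≠ D.getD (PySem.List.pyGetD numbers (i - 1) 0) []))
      = pvBrkI D numbers := rfl
  rw [hfA, hfB]
  have hlast : PySem.List.pyGetD numbers (-1) 0 = pvNum numbers (numbers.length - 1) := by
    rw [PySem.List.pyGetD_neg_one numbers 0 hne]
    have h1 : pvNum numbers (numbers.length - 1) = numbers[numbers.length - 1]'(by omega) :=
      List.getD_eq_getElem numbers 0 (by omega)
    rw [h1, List.getLast_eq_getElem]
  have hzero : PySem.List.pyGetD numbers 0 0 = pvNum numbers 0 := by
    rw [PySem.List.pyGetD_zero]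
    rfl
  rw [hlast, hzero]
  have hA := pvA_loop D numbers (numbers.length - 1) 1 [] (pvNum numbers 0) (by omega) (le_refl 1)
  simp only [Nat.cast_one] at hA
  have hB := pvB_chop D numbers (numbers.length - 1) 1 0 (by omega) (by omega)
  simp only [Nat.cast_one, Nat.cast_zero] at hB
  rw [hA]
  simp only [List.cons_append, List.nil_append, List.tail_cons]
  rw [hB]
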